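-- pv_equiv track=rewrite | github.com/oriollorenzo/FortiACL | app/services/sync_service.py | _resolve_port_limit
-- ===== SOURCE A (Python) =====
-- def _resolve_port_limit(model_name: str, limits_cfg: dict) -> int:
--     limit = limits_cfg.get("DEFAULT_MAX", 48)
--     sorted_keys = sorted(
--         [k for k in limits_cfg.keys() if k != "DEFAULT_MAX"],
--         key=lambda x: len(str(x)),
--         reverse=True,
--     )
--     for key in sorted_keys:
--         if str(key) in model_name:
--             return limits_cfg[key]
--     return limit
-- ===== SOURCE B (Python) =====
-- def _resolve_port_limit(model_name: str, limits_cfg: dict) -> int: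
--     best = None
--     for key in limits_cfg:
--         if key != "DEFAULT_MAX" and key in model_name:
--             if best is None or len(key) > len(best):
--                 best = key
--     if best is None:
--         return limits_cfg.get("DEFAULT_MAX", 48)
--     return limits_cfg[best]
-- ===== Notes on version B (the rewrite author's own statement) =====
-- stated objective: simpler
-- what changed: Dropped the sort entirely: a single pass over the dict keys keeps the longest matching key (strict > so the first among equal-length ties wins, matching the stable sort's tie-break), then one final lookup.
import Mathlib
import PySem

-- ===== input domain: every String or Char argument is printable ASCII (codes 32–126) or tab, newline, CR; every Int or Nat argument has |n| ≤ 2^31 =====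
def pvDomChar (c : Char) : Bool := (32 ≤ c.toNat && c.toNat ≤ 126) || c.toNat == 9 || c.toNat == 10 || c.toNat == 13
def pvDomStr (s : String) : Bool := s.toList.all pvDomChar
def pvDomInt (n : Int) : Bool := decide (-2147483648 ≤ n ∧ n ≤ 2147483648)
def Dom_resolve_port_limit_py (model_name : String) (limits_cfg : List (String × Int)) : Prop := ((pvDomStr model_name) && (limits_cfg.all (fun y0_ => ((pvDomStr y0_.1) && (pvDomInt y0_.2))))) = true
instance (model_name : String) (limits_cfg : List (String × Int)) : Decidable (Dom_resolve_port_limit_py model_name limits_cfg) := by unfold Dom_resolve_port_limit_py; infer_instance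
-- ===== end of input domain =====

-- ===== PORT A =====
-- A: limit = get("DEFAULT_MAX", 48); sort the other keys by length, longest first (stable);
-- return the value of the first sorted key that is a substring of model_name, else limit.
-- The loop 'for key in sorted_keys: if str(key) in model_name: return limits_cfg[key]'.
-- 'limits_cfg[key]' cannot raise (key comes from the dict's own keys), so a getD with dummy default is exact.
def pvALoop (model_name : String) (d : PySem.Dict String Int) : List String → Int → Int
  | [], limit => limit
  | k :: rest, limit =>
    if PySem.Str.isIn k model_name then d.getD k 0 else pvALoop model_name d rest limit

def resolve_port_limit_py (model_name : String) (limits_cfg : List (String × Int)) : Int :=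
  let d := PySem.Dict.ofList limits_cfg
  let limit := d.getD "DEFAULT_MAX" 48
  let sorted_keys :=
    PySem.List.sorted (d.keys.filter (fun k => k != "DEFAULT_MAX")) (fun k => PySem.Str.len k) true
  pvALoop model_name d sorted_keys limit

-- ===== PORT B =====
-- B: one pass over the keys keeping the longest matching key (strict >, so the first of a tie wins).
def pvBStep (best : Option String) (k : String) : Option String :=
  match best with
  | none => some k
  | some b => if PySem.Str.len b < PySem.Str.len k then some k else some b

def resolve_port_limit_py_alt (model_name : String) (limits_cfg : List (String × Int)) : Int :=
  let d := PySem.Dict.ofList limits_cfg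
  let best := d.keys.foldl
    (fun best k =>
      if (k != "DEFAULT_MAX") && PySem.Str.isIn k model_name then pvBStep best k else best)
    none
  match best with
  | none => d.getD "DEFAULT_MAX" 48
  | some b => d.getD b 0

-- ===== PRECONDITION & SPEC =====
def Spec_resolve_port_limit_py (model_name : String) (limits_cfg : List (String × Int)) (out : Int) : Prop := out = resolve_port_limit_py_alt model_name limits_cfg
instance (model_name : String) (limits_cfg : List (String × Int)) (out : Int) : Decidable (Spec_resolve_port_limit_py model_name limits_cfg out) := by unfold Spec_resolve_port_limit_py; infer_instance

-- ===== CLAIM (what is proved, stated in full; the proofs are below) =====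
def Claim_equal_resolve_port_limit_py : Prop := ∀ (model_name : String) (limits_cfg : List (String × Int)), Dom_resolve_port_limit_py model_name limits_cfg → Spec_resolve_port_limit_py model_name limits_cfg (resolve_port_limit_py model_name limits_cfg)

-- ===== LEMMAS AND PROOFS =====

-- A's scan over a list of keys returns the value of the first substring match, else limit.
theorem pvALoop_eq_find? (model_name : String) (d : PySem.Dict String Int) (l : List String)
    (limit : Int) :
    pvALoop model_name d l limit =
      match l.find? (fun k => PySem.Str.isIn k model_name) with
      | some k => d.getD k 0
      | none => limit := by
  induction l with
  | nil => rfl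
  | cons k rest ih =>
    by_cases h : PySem.Str.isIn k model_name
    · rw [List.find?_cons_of_pos (p := fun k => PySem.Str.isIn k model_name) h]
      simp only [pvALoop]
      rw [if_pos h]
    · rw [List.find?_cons_of_neg (p := fun k => PySem.Str.isIn k model_name) h]
      simp only [pvALoop]
      rw [if_neg h, ih]

-- Inserting x into a length-descending list s: the first Q-match of the result is the
-- "keep the strictly longer, first wins on ties" update of the first Q-match of s by x.
theorem pvFind_insertBy (Q : String → Bool) (x : String) (s : List String)
    (hs : s.Pairwise (fun a b => PySem.Str.len b ≤ PySem.Str.len a)) :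
    (PySem.List.insertBy (fun a b => decide (PySem.Str.len b < PySem.Str.len a)) x s).find? Q =
      (if Q x then pvBStep (s.find? Q) x else s.find? Q) := by
  induction s with
  | nil =>
    by_cases hx : Q x <;> simp [PySem.List.insertBy, List.find?, hx, pvBStep]
  | cons y ys ih =>
    rcases List.pairwise_cons.mp hs with ⟨hy, hys⟩
    by_cases hlt : y.length < x.length
    · -- x goes in front: x :: y :: ys
      have hins : PySem.List.insertBy (fun a b => decide (PySem.Str.len b < PySem.Str.len a)) x (y :: ys)
          = x :: y :: ys := by
        simp [PySem.List.insertBy, hlt]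
      rw [hins]
      by_cases hx : Q x
      · -- first match is x; every match in y :: ys is at most as long as y, hence shorter than x
        have hstep : pvBStep ((y :: ys).find? Q) x = some x := by
          cases hfind : (y :: ys).find? Q with
          | none => rfl
          | some b =>
            have hb : b ∈ y :: ys := List.mem_of_find?_eq_some hfind
            have hble : b.length ≤ y.length := by
              rcases List.mem_cons.mp hb with hb | hb
              · exact le_of_eq (by rw [hb])
              · simpa using hy b hb
            simp only [pvBStep]
            rw [if_pos (by simp; omega)]
        rw [List.find?_cons_of_pos hx, if_pos hx, hstep]
      · rw [List.find?_cons_of_neg hx, if_neg hx]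
    · -- x goes after y: y :: insertBy x ys
      have hins : PySem.List.insertBy (fun a b => decide (PySem.Str.len b < PySem.Str.len a)) x (y :: ys)
          = y :: PySem.List.insertBy (fun a b => decide (PySem.Str.len b < PySem.Str.len a)) x ys := by
        simp [PySem.List.insertBy, hlt]
      rw [hins]
      by_cases hQy : Q y
      · -- first match stays y: x is not strictly longer than y
        rw [List.find?_cons_of_pos hQy, List.find?_cons_of_pos hQy]
        by_cases hx : Q x
        · rw [if_pos hx]
          simp only [pvBStep]
          rw [if_neg (by simp; omega)]
        · rw [if_neg hx]
      · rw [List.find?_cons_of_neg hQy, List.find?_cons_of_neg hQy, ih hys]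

-- Core: first substring match of the stable length-descending sort
-- = single-pass longest-match (first wins on ties) over the unsorted keys.
theorem pvSorted_find_eq_foldl (Q : String → Bool) (xs : List String) :
    (PySem.List.sorted xs (fun k => PySem.Str.len k) true).find? Q =
      (xs.filter Q).foldl pvBStep none := by
  induction xs using List.reverseRecOn with
  | nil => rfl
  | append_singleton l x ih =>
    have hS : PySem.List.sorted (l ++ [x]) (fun k => PySem.Str.len k) true
        = PySem.List.insertBy (fun a b => decide (PySem.Str.len b < PySem.Str.len a)) x
            (PySem.List.sorted l (fun k => PySem.Str.len k) true) := by
      rw [PySem.List.sorted_rev_eq_foldl_insertBy, PySem.List.sorted_rev_eq_foldl_insertBy,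
        List.foldl_append]
      rfl
    have hpw := PySem.List.sorted_pairwise_rev l (fun k => PySem.Str.len k)
    rw [hS, pvFind_insertBy Q x _ hpw, ih, List.filter_append]
    by_cases hx : Q x
    · simp [hx, List.foldl_append]
    · simp only [Bool.not_eq_true] at hx
      simp [hx]

-- ===== VERDICT (by name: the statement is the Claim_ definition above) =====
theorem resolve_port_limit_py_spec : Claim_equal_resolve_port_limit_py := by
  intro model_name limits_cfg _
  unfold Spec_resolve_port_limit_py resolve_port_limit_py resolve_port_limit_py_alt
  simp only [pvALoop_eq_find?, pvSorted_find_eq_foldl, List.foldl_filter, List.filter_filter]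
  have hfun : (fun (best : Option String) (k : String) =>
        if (PySem.Str.isIn k model_name && (k != "DEFAULT_MAX")) = true then pvBStep best k else best)
      = (fun (best : Option String) (k : String) =>
        if ((k != "DEFAULT_MAX") && PySem.Str.isIn k model_name) = true then pvBStep best k else best) := by
    funext best k; rw [Bool.and_comm]
  rw [hfun]
  cases (PySem.Dict.ofList limits_cfg).keys.foldl
      (fun (best : Option String) (k : String) =>
        if ((k != "DEFAULT_MAX") && PySem.Str.isIn k model_name) = true then pvBStep best k else best)
      none <;> rfl
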